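-- pv_equiv track=rewrite | github.com/aerospike/aerospike-admin | lib/log_analyzer/log_handler/log_latency.py | _add_stat_values
-- ===== SOURCE A (Python) =====
-- def _add_stat_values(v1, v2):
--     if not v1:
--         return v2
--
--     if not v2:
--         return v1
--
--     l1 = len(v1)
--     l2 = len(v2)
--
--     values = []
--     for i in range(max(l1, l2)):
--         val = 0
--         if i < l1:
--             val += v1[i]
--
--         if i < l2:
--             val += v2[i]
--
--         values.append(val)
--
--     return values
-- ===== SOURCE B (Python) =====
-- def _add_stat_values(v1, v2):
--     if not v1:
--         return v2
--     if not v2: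
--         return v1
--     n = min(len(v1), len(v2))
--     result = [v1[i] + v2[i] for i in range(n)]
--     result += v1[n:]
--     result += v2[n:]
--     return result
-- ===== Notes on version B (the rewrite author's own statement) =====
-- stated objective: simpler
-- what changed: Replaces the per-index loop with its two i<len bounds checks by summing the overlapping prefix in one comprehension and concatenating the leftover tail slices.
import Mathlib
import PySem

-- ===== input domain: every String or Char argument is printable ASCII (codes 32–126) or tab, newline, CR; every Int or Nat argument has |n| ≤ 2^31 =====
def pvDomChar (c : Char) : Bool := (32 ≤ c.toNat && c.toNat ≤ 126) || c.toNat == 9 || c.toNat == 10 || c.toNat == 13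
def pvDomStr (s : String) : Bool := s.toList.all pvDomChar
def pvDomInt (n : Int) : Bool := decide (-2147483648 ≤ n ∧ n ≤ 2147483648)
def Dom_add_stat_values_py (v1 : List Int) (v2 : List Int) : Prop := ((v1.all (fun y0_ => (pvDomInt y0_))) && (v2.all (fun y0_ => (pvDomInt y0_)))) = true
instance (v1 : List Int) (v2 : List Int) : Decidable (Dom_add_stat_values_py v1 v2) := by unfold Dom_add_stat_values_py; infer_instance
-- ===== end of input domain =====

-- B replaces the per-index bounds-checked loop by summing the overlapping prefix and appending the leftover tail slices (simpler decomposition; return value only).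
-- ===== PORT A =====
def add_stat_values_py (v1 : List Int) (v2 : List Int) : List Int :=
  if v1 = [] then v2
  else if v2 = [] then v1
  else
    let l1 := v1.length
    let l2 := v2.length
    (List.range (max l1 l2)).foldl (fun values i =>
      let val : Int := 0
      let val := if i < l1 then val + v1.getD i 0 else val
      let val := if i < l2 then val + v2.getD i 0 else val
      values ++ [val]) []

-- ===== PORT B =====
def add_stat_values_py_alt (v1 : List Int) (v2 : List Int) : List Int :=
  if v1 = [] then v2
  else if v2 = [] then v1
  else
    let n := min v1.length v2.length
    let result := (List.range n).map (fun i => v1.getD i 0 + v2.getD i 0)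
    result ++ v1.drop n ++ v2.drop n

-- ===== PRECONDITION & SPEC =====
def Spec_add_stat_values_py (v1 : List Int) (v2 : List Int) (out : List Int) : Prop := out = add_stat_values_py_alt v1 v2
instance (v1 : List Int) (v2 : List Int) (out : List Int) : Decidable (Spec_add_stat_values_py v1 v2 out) := by unfold Spec_add_stat_values_py; infer_instance

-- ===== CLAIM (what is proved, stated in full; the proofs are below) =====
def Claim_equal_add_stat_values_py : Prop := ∀ (v1 : List Int) (v2 : List Int), Dom_add_stat_values_py v1 v2 → Spec_add_stat_values_py v1 v2 (add_stat_values_py v1 v2)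

-- ===== LEMMAS AND PROOFS =====

-- a foldl that appends one element per index is a map
theorem pv_foldl_append_map {α β : Type} (f : α → β) (l : List α) (acc : List β) :
    l.foldl (fun values i => values ++ [f i]) acc = acc ++ l.map f := by
  induction l generalizing acc with
  | nil => simp
  | cons a t ih => simp [List.foldl, ih]

theorem pv_main (v1 v2 : List Int) :
    (List.range (max v1.length v2.length)).map (fun i =>
        let val : Int := 0
        let val := if i < v1.length then val + v1.getD i 0 else val
        if i < v2.length then val + v2.getD i 0 else val)
      = (List.range (min v1.length v2.length)).map
          (fun i => v1.getD i 0 + v2.getD i 0)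
        ++ v1.drop (min v1.length v2.length) ++ v2.drop (min v1.length v2.length) := by
  apply List.ext_getElem
  · simp; omega
  · intro i h1 h2
    have hi : i < max v1.length v2.length := by simpa using h1
    rw [List.getElem_map, List.getElem_range]
    by_cases hn : i < min v1.length v2.length
    · rw [List.getElem_append_left (by simp; omega),
          List.getElem_append_left (by simp; omega),
          List.getElem_map, List.getElem_range]
      have ha : i < v1.length := by omega
      have hb : i < v2.length := by omega
      simp [ha, hb, List.getD_eq_getElem?_getD]
    · by_cases ha : i < v1.length
      · -- v1 is the longer list: i lands in v1's tail
        have hb : ¬ i < v2.length := by omega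
        rw [List.getElem_append_left (by simp; omega),
            List.getElem_append_right (by simp; omega)]
        have hidx : min v1.length v2.length + (i - min v1.length v2.length) = i := by
          omega
        simp [ha, hb, List.getD_eq_getElem?_getD,
          List.getElem_drop, hidx]
      · -- v2 is the longer list: i lands in v2's tail
        have hb : i < v2.length := by omega
        rw [List.getElem_append_right (by simp; omega)]
        have hidx : min v1.length v2.length +
            (i - ((List.range (min v1.length v2.length)).map
                (fun i => v1.getD i 0 + v2.getD i 0) ++
              v1.drop (min v1.length v2.length)).length) = i := by
          simp; omega
        simp [ha, hb, List.getD_eq_getElem?_getD,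
          List.getElem_drop]
        congr 1
        omega

-- ===== VERDICT (by name: the statement is the Claim_ definition above) =====
theorem add_stat_values_py_spec : Claim_equal_add_stat_values_py := by
  intro v1 v2 _
  unfold Spec_add_stat_values_py add_stat_values_py add_stat_values_py_alt
  by_cases h1 : v1 = []
  · simp [h1]
  by_cases h2 : v2 = []
  · simp [h1, h2]
  simp only [h1, h2, if_false]
  rw [pv_foldl_append_map, List.nil_append, pv_main]
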